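-- pv_equiv track=rewrite | github.com/robeskins/mech-interp-ft | experiment2/plotting_utils.py | calculate_node_changes
-- ===== SOURCE A (Python) =====
-- def calculate_node_changes(checkpoints):
--     changes = []
--     for i in range(1, len(checkpoints)):
--         prev_nodes = checkpoints[i - 1]['nodes']
--         curr_nodes = checkpoints[i]['nodes']
--         added = sum(
--             1 for node in curr_nodes
--             if curr_nodes[node].get('in_graph', False) and not prev_nodes.get(node, {}).get('in_graph', False)
--         )
--
--         removed = sum(
--             1 for node in prev_nodes
--             if prev_nodes[node].get('in_graph', False) and not curr_nodes.get(node, {}).get('in_graph', False)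
--         )
--         changes.append(added + removed)
--
--     return changes
-- ===== SOURCE B (Python) =====
-- def calculate_node_changes(checkpoints):
--     n = len(checkpoints)
--     if n < 2:
--         return []
--     # one pass: inverted index node -> increasing list of checkpoint indices where it is active
--     activity = {}
--     for i, cp in enumerate(checkpoints):
--         for node, data in cp['nodes'].items():
--             if data.get('in_graph', False):
--                 activity.setdefault(node, []).append(i)
--     # scatter each node's activity boundaries as +1 events into a difference array
--     changes = [0] * (n - 1)
--     for idxs in activity.values():
--         for i in idxs:
--             if i > 0 and i - 1 not in idxs:
--                 changes[i - 1] += 1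
--             if i + 1 < n and i + 1 not in idxs:
--                 changes[i] += 1
--     return changes
-- ===== Notes on version B (the rewrite author's own statement) =====
-- stated objective: alternative
-- what changed: B transposes the computation: one pass builds an inverted index node -> list of checkpoint indices where it is active, then each node's activity boundaries are scattered as +1 events into a single difference array, instead of A's per-transition pair of filtered counting loops.
import Mathlib
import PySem

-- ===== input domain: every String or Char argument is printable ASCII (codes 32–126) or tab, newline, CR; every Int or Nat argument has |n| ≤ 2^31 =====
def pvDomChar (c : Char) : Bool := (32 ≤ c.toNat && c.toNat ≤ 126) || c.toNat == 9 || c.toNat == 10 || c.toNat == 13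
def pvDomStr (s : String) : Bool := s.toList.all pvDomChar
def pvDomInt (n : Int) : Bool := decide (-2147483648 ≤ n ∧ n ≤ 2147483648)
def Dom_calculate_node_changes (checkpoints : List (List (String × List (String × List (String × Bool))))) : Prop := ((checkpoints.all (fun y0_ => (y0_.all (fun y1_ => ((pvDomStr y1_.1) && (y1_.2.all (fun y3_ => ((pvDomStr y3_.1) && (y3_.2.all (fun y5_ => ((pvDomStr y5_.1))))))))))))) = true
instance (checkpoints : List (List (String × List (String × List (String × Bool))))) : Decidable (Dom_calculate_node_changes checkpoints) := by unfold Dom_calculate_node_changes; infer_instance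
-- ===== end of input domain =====

-- B transposes the computation: one pass builds an inverted index node → checkpoint indices where the
-- node is active, then each node's activity boundaries are scattered as +1 events into one difference
-- array, instead of A's two filtered counting loops per consecutive pair (alternative; similar cost).

-- ===== PORT A =====
-- shared tiny helper: Python's  d.get('in_graph', False)  (dict lookup = first match)
def pvInGraph (attrs : List (String × Bool)) : Bool :=
  (List.lookup "in_graph" attrs).getD false

def calculate_node_changes (checkpoints : List (List (String × List (String × List (String × Bool))))) : List Int :=
  -- changes = []; for i in range(1, len(checkpoints)): … changes.append(added + removed)
  (PySem.List.pyRange 1 (PySem.List.len checkpoints) 1).foldl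
    (fun changes i =>
      -- checkpoints[i-1]['nodes'] / checkpoints[i]['nodes']; the KeyError case is excluded by Pre_
      let prev_nodes := (List.lookup "nodes" (PySem.List.pyGetD checkpoints (i - 1) [])).getD []
      let curr_nodes := (List.lookup "nodes" (PySem.List.pyGetD checkpoints i [])).getD []
      -- added = sum(1 for node in curr_nodes if …): a 0/1-sum is countP
      let added : Int := (curr_nodes.countP (fun kv =>
        pvInGraph ((List.lookup kv.1 curr_nodes).getD []) &&
        !pvInGraph ((List.lookup kv.1 prev_nodes).getD [])) : Nat)
      let removed : Int := (prev_nodes.countP (fun kv =>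
        pvInGraph ((List.lookup kv.1 prev_nodes).getD []) &&
        !pvInGraph ((List.lookup kv.1 curr_nodes).getD [])) : Nat)
      changes ++ [added + removed])
    []

-- ===== PORT B =====
-- activity = {}; for i, cp in enumerate(checkpoints): for node, data in cp['nodes'].items():
--   if data.get('in_graph', False): activity.setdefault(node, []).append(i)
def pvActivity (checkpoints : List (List (String × List (String × List (String × Bool))))) :
    PySem.Dict String (List Int) :=
  (PySem.List.enumerate checkpoints).foldl
    (fun d ic =>
      ((List.lookup "nodes" ic.2).getD []).foldl
        (fun d kv =>
          if pvInGraph kv.2 then PySem.Dict.modify d kv.1 [] (fun l => l ++ [ic.1]) else d)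
        d)
    PySem.Dict.empty

-- changes[i] += 1 ; exact for 0 ≤ i < len(changes), which the guards at both call sites guarantee
def pvInc (changes : List Int) (i : Int) : List Int :=
  changes.set i.toNat (changes.getD i.toNat 0 + 1)

def calculate_node_changes_alt (checkpoints : List (List (String × List (String × List (String × Bool))))) : List Int :=
  let n : Int := PySem.List.len checkpoints
  if n < 2 then []
  else
    -- changes = [0] * (n - 1); for idxs in activity.values(): for i in idxs: …
    (PySem.Dict.values (pvActivity checkpoints)).foldl
      (fun changes idxs =>
        idxs.foldl
          (fun changes i =>
            let changes := if 0 < i ∧ (i - 1) ∉ idxs then pvInc changes (i - 1) else changes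
            if i + 1 < n ∧ (i + 1) ∉ idxs then pvInc changes i else changes)
          changes)
      (List.replicate (n - 1).toNat 0)

-- ===== PRECONDITION & SPEC =====
-- Pre_ excludes (a) inputs of length ≥ 2 where some checkpoint lacks the 'nodes' key — there the
-- Python A (and B) raises KeyError — and (b) association lists with duplicate dict keys, which do
-- not represent any Python dict value (a Python dict cannot hold duplicate keys).
def Pre_calculate_node_changes (checkpoints : List (List (String × List (String × List (String × Bool))))) : Prop :=
  (2 ≤ checkpoints.length → ∀ cp ∈ checkpoints, (List.lookup "nodes" cp).isSome = true) ∧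
  (∀ cp ∈ checkpoints, (((List.lookup "nodes" cp).getD []).map Prod.fst).Nodup)
instance (checkpoints : List (List (String × List (String × List (String × Bool))))) : Decidable (Pre_calculate_node_changes checkpoints) := by unfold Pre_calculate_node_changes; infer_instance

def pvWitness_calculate_node_changes : (List (List (String × List (String × List (String × Bool))))) :=
  [[("nodes", [("a", [("in_graph", true)])])], [("nodes", [])]]

def Spec_calculate_node_changes (checkpoints : List (List (String × List (String × List (String × Bool))))) (out : List Int) : Prop := out = calculate_node_changes_alt checkpoints
instance (checkpoints : List (List (String × List (String × List (String × Bool))))) (out : List Int) : Decidable (Spec_calculate_node_changes checkpoints out) := by unfold Spec_calculate_node_changes; infer_instance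

-- ===== CLAIM (what is proved, stated in full; the proofs are below) =====
def Claim_equal_calculate_node_changes : Prop := ∀ (checkpoints : List (List (String × List (String × List (String × Bool))))), Dom_calculate_node_changes checkpoints → Pre_calculate_node_changes checkpoints → Spec_calculate_node_changes checkpoints (calculate_node_changes checkpoints)

-- ===== LEMMAS AND PROOFS =====

-- abbreviations used only by the proofs
def pvNd (cp : List (String × List (String × List (String × Bool)))) : List (String × List (String × Bool)) :=
  (List.lookup "nodes" cp).getD []

def pvAct (cp : List (String × List (String × List (String × Bool)))) (k : String) : Bool :=
  pvInGraph ((List.lookup k (pvNd cp)).getD [])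

-- A's per-pair value, index-free
def pvStep (p c : List (String × List (String × List (String × Bool)))) : Int :=
  ((((pvNd c).countP (fun kv => pvAct c kv.1 && !pvAct p kv.1)) : Nat) : Int) +
  ((((pvNd p).countP (fun kv => pvAct p kv.1 && !pvAct c kv.1)) : Nat) : Int)

-- the list of checkpoint indices (from start s) at which node k is active
def pvIdxList (cs : List (List (String × List (String × List (String × Bool))))) (s : Int) (k : String) : List Int :=
  match cs with
  | [] => []
  | cp :: rest => (if pvAct cp k then [s] else []) ++ pvIdxList rest (s + 1) k

-- ---------- A's normal form ----------
lemma pvA_eq_map (cs : List (List (String × List (String × List (String × Bool))))) :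
    calculate_node_changes cs
      = (List.range (cs.length - 1)).map (fun j => pvStep (cs.getD j []) (cs.getD (j + 1) [])) := by
  unfold calculate_node_changes
  rw [PySem.List.foldl_append_singleton_eq_map, List.nil_append, PySem.List.len_eq,
    PySem.List.pyRange_one]
  have hn : (((cs.length : Int)) - 1).toNat = cs.length - 1 := by omega
  rw [hn, List.map_map]
  apply List.map_congr_left
  intro k _
  have e2 : (1 : Int) + (k : Int) = (((k + 1 : Nat)) : Int) := by push_cast; ring
  have e3 : (((k + 1 : Nat)) : Int) - 1 = ((k : Nat) : Int) := by push_cast; ring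
  simp only [Function.comp_def, e2, e3, PySem.List.pyGetD_natCast]
  rfl

-- ---------- the inverted index: getD characterisation ----------
lemma pvInner_getD (x : Int) (k : String) :
    ∀ (entries : List (String × List (String × Bool))) (d : PySem.Dict String (List Int)),
      (entries.foldl (fun d kv =>
          if pvInGraph kv.2 then PySem.Dict.modify d kv.1 [] (fun l => l ++ [x]) else d) d).getD k []
      = PySem.Dict.getD d k [] ++
          List.replicate (entries.countP (fun kv => kv.1 == k && pvInGraph kv.2)) x := by
  intro entries
  induction entries with
  | nil => intro d; simp
  | cons a t ih =>
    intro d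
    simp only [List.foldl_cons, List.countP_cons]
    by_cases hg : pvInGraph a.2
    · rw [if_pos hg, ih]
      by_cases hk : a.1 = k
      · subst hk
        rw [PySem.Dict.getD_modify_self]
        simp [hg, List.replicate_succ, List.append_assoc]
      · rw [PySem.Dict.getD_modify]
        have hb : (a.1 == k) = false := by simpa using hk
        simp [hb, Ne.symm hk]
    · simp only [Bool.not_eq_true] at hg
      rw [if_neg (by simp [hg]), ih]
      simp [hg]

lemma pvCount_act (k : String) :
    ∀ (entries : List (String × List (String × Bool))), (entries.map Prod.fst).Nodup →
      entries.countP (fun kv => kv.1 == k && pvInGraph kv.2)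
        = if pvInGraph ((List.lookup k entries).getD []) then 1 else 0 := by
  intro entries
  induction entries with
  | nil => intro _; simp [pvInGraph]
  | cons a t ih =>
    intro h
    simp only [List.map_cons, List.nodup_cons] at h
    simp only [List.countP_cons]
    by_cases hk : a.1 = k
    · subst hk
      have hz : t.countP (fun kv => kv.1 == a.1 && pvInGraph kv.2) = 0 := by
        apply List.countP_eq_zero.mpr
        intro kv hkv
        have : kv.1 ≠ a.1 := fun he => h.1 (he ▸ List.mem_map_of_mem hkv)
        simp [this]
      rw [hz]
      by_cases hg : pvInGraph a.2 <;> simp [List.lookup, hg]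
    · have hb : (a.1 == k) = false := by simpa using hk
      have hb' : (k == a.1) = false := by simpa using (Ne.symm hk)
      have hl : List.lookup k (a :: t) = List.lookup k t := by
        cases a with
        | mk a1 a2 => simp only at hb' ⊢; simp [List.lookup, hb']
      rw [hl, ih h.2]
      simp [hb]

lemma pvOuter_getD (k : String) :
    ∀ (cs : List (List (String × List (String × List (String × Bool))))) (s : Int)
      (d : PySem.Dict String (List Int)),
      (∀ cp ∈ cs, ((pvNd cp).map Prod.fst).Nodup) →
      ((PySem.List.enumerate cs s).foldl
          (fun d ic =>
            ((List.lookup "nodes" ic.2).getD []).foldl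
              (fun d kv =>
                if pvInGraph kv.2 then PySem.Dict.modify d kv.1 [] (fun l => l ++ [ic.1]) else d)
              d)
          d).getD k []
        = PySem.Dict.getD d k [] ++ pvIdxList cs s k := by
  intro cs
  induction cs with
  | nil => intro s d _; simp [PySem.List.enumerate, pvIdxList]
  | cons cp rest ih =>
    intro s d h
    rw [PySem.List.enumerate_cons, List.foldl_cons,
      ih (s + 1) _ (fun c hc => h c (List.mem_cons_of_mem _ hc))]
    dsimp only
    rw [pvInner_getD, pvCount_act k ((List.lookup "nodes" cp).getD []) (h cp List.mem_cons_self)]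
    show _ = d.getD k [] ++ pvIdxList (cp :: rest) s k
    rw [pvIdxList]
    by_cases hg : pvAct cp k
    · have hg' : pvInGraph ((List.lookup k ((List.lookup "nodes" cp).getD [])).getD []) = true := hg
      simp [hg', hg, List.replicate_succ, List.append_assoc]
    · have hg' : pvInGraph ((List.lookup k ((List.lookup "nodes" cp).getD [])).getD []) = false := by
        simpa [pvAct, pvNd] using hg
      simp [hg', hg]

lemma pvActivity_getD (cs : List (List (String × List (String × List (String × Bool)))))
    (h : ∀ cp ∈ cs, ((pvNd cp).map Prod.fst).Nodup) (k : String) :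
    PySem.Dict.getD (pvActivity cs) k [] = pvIdxList cs 0 k := by
  unfold pvActivity
  rw [pvOuter_getD k cs 0 PySem.Dict.empty h]
  simp

-- ---------- pvIdxList: membership, order, bounds ----------
lemma mem_pvIdxList (k : String) :
    ∀ (cs : List (List (String × List (String × List (String × Bool))))) (s i : Int),
      i ∈ pvIdxList cs s k
        ↔ ∃ j : Nat, j < cs.length ∧ i = s + j ∧ pvAct (cs.getD j []) k := by
  intro cs
  induction cs with
  | nil => intro s i; simp [pvIdxList]
  | cons cp rest ih =>
    intro s i
    simp only [pvIdxList, List.mem_append]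
    constructor
    · intro hmem
      rcases hmem with hmem | hmem
      · by_cases hg : pvAct cp k
        · simp only [hg, if_true, List.mem_singleton] at hmem
          exact ⟨0, by simp, by simp [hmem], by simpa using hg⟩
        · simp [hg] at hmem
      · rcases (ih (s + 1) i).mp hmem with ⟨j, hj, hi, ha⟩
        refine ⟨j + 1, by simp only [List.length_cons]; omega, by push_cast; omega, by simpa using ha⟩
    · rintro ⟨j, hj, hi, ha⟩
      cases j with
      | zero =>
        left
        have hg : pvAct cp k := by simpa using ha
        simp only [Nat.cast_zero, add_zero] at hi
        simp [hg, hi]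
      | succ j' =>
        right
        apply (ih (s + 1) i).mpr
        refine ⟨j', by simp only [List.length_cons] at hj; omega, by push_cast at hi ⊢; omega, by simpa using ha⟩

lemma pvIdxList_lb (k : String)
    (cs : List (List (String × List (String × List (String × Bool))))) (s i : Int)
    (h : i ∈ pvIdxList cs s k) : s ≤ i := by
  rcases (mem_pvIdxList k cs s i).mp h with ⟨j, _, hi, _⟩
  omega

lemma pvIdxList_pairwise (k : String) :
    ∀ (cs : List (List (String × List (String × List (String × Bool))))) (s : Int),
      (pvIdxList cs s k).Pairwise (· < ·) := by
  intro cs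
  induction cs with
  | nil => intro s; simp [pvIdxList]
  | cons cp rest ih =>
    intro s
    simp only [pvIdxList]
    apply List.pairwise_append.mpr
    refine ⟨?_, ih (s + 1), ?_⟩
    · split <;> simp
    · intro a ha b hb
      have hb' := pvIdxList_lb k rest (s + 1) b hb
      have : a = s := by split at ha <;> simp_all
      omega

lemma pvIdxList_nodup (k : String)
    (cs : List (List (String × List (String × List (String × Bool))))) (s : Int) :
    (pvIdxList cs s k).Nodup :=
  (pvIdxList_pairwise k cs s).imp (fun h => ne_of_lt h)

lemma pvIdxList_bounds (k : String)
    (cs : List (List (String × List (String × List (String × Bool))))) (i : Int)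
    (h : i ∈ pvIdxList cs 0 k) : 0 ≤ i ∧ i < (cs.length : Int) := by
  rcases (mem_pvIdxList k cs 0 i).mp h with ⟨j, hj, hi, _⟩
  omega

lemma mem_pvIdxList_nat (k : String)
    (cs : List (List (String × List (String × List (String × Bool))))) (j : Nat)
    (hj : j < cs.length) :
    ((j : Int) ∈ pvIdxList cs 0 k) = (pvAct (cs.getD j []) k = true) := by
  simp only [eq_iff_iff]
  rw [mem_pvIdxList]
  constructor
  · rintro ⟨j', _, he, ha⟩
    have hjj : j' = j := by omega
    exact hjj ▸ ha
  · intro ha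
    exact ⟨j, hj, by omega, ha⟩

-- ---------- keys of the inverted index ----------
lemma pvNodup_keys_inner (x : Int) :
    ∀ (entries : List (String × List (String × Bool))) (d : PySem.Dict String (List Int)),
      d.keys.Nodup →
      ((entries.foldl (fun d kv =>
          if pvInGraph kv.2 then PySem.Dict.modify d kv.1 [] (fun l => l ++ [x]) else d) d)).keys.Nodup := by
  intro entries
  induction entries with
  | nil => intro d h; simpa using h
  | cons a t ih =>
    intro d h
    simp only [List.foldl_cons]
    by_cases hg : pvInGraph a.2
    · rw [if_pos hg]
      apply ih
      rw [PySem.Dict.keys_modify]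
      by_cases hc : d.contains a.1
      · rwa [PySem.Dict.keys_insert_of_contains d _ (by simpa using hc)]
      · rw [PySem.Dict.keys_insert_of_not_contains d _ (by simpa using hc)]
        refine List.Nodup.append h (by simp) ?_
        intro x hx hx'
        simp only [List.mem_singleton] at hx'
        subst hx'
        exact absurd ((PySem.Dict.contains_iff_mem_keys d _).mpr hx) (by simpa using hc)
    · rw [if_neg (by simpa using hg)]
      exact ih d h

lemma pvNodup_keys_outer :
    ∀ (cs : List (List (String × List (String × List (String × Bool))))) (s : Int)
      (d : PySem.Dict String (List Int)), d.keys.Nodup →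
      ((PySem.List.enumerate cs s).foldl
          (fun d ic =>
            ((List.lookup "nodes" ic.2).getD []).foldl
              (fun d kv =>
                if pvInGraph kv.2 then PySem.Dict.modify d kv.1 [] (fun l => l ++ [ic.1]) else d)
              d)
          d).keys.Nodup := by
  intro cs
  induction cs with
  | nil => intro s d h; simpa [PySem.List.enumerate] using h
  | cons cp rest ih =>
    intro s d h
    rw [PySem.List.enumerate_cons, List.foldl_cons]
    exact ih (s + 1) _ (pvNodup_keys_inner s _ d h)

lemma pvNodup_keys_activity (cs : List (List (String × List (String × List (String × Bool))))) :
    (pvActivity cs).keys.Nodup := by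
  unfold pvActivity
  exact pvNodup_keys_outer cs 0 PySem.Dict.empty PySem.Dict.nodup_keys_empty

lemma pvGetD_ne_nil_mem_keys (d : PySem.Dict String (List Int)) (k : String)
    (h : PySem.Dict.getD d k [] ≠ []) : k ∈ d.keys := by
  by_contra hk
  have hc : d.contains k = false := by
    rcases Bool.eq_false_or_eq_true (d.contains k) with h' | h'
    · exact absurd ((PySem.Dict.contains_iff_mem_keys d k).mp h') hk
    · exact h'
  exact h (PySem.Dict.getD_of_not_contains d [] hc)

lemma pvLookup_eq_none {β : Type} :
    ∀ (l : List (String × β)) (k : String), k ∉ l.map Prod.fst → List.lookup k l = none := by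
  intro l
  induction l with
  | nil => intro k _; rfl
  | cons a t ih =>
    intro k hk
    simp only [List.map_cons, List.mem_cons, not_or] at hk
    have hb : (k == a.1) = false := by simpa using hk.1
    cases a with
    | mk a1 a2 =>
      simp only at hb
      simp [List.lookup, hb, ih k hk.2]

lemma pvAct_mem_ndKeys (cp : List (String × List (String × List (String × Bool)))) (k : String)
    (h : pvAct cp k = true) : k ∈ (pvNd cp).map Prod.fst := by
  by_contra hk
  rw [pvAct, pvLookup_eq_none _ k hk] at h
  simp [pvInGraph] at h

lemma pvAct_mem_keys (cs : List (List (String × List (String × List (String × Bool)))))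
    (h : ∀ cp ∈ cs, ((pvNd cp).map Prod.fst).Nodup) (j : Nat) (hj : j < cs.length) (k : String)
    (ha : pvAct (cs.getD j []) k = true) : k ∈ (pvActivity cs).keys := by
  apply pvGetD_ne_nil_mem_keys
  rw [pvActivity_getD cs h k]
  intro hnil
  have hm : (j : Int) ∈ pvIdxList cs 0 k := by
    rw [mem_pvIdxList_nat k cs j hj]; exact ha
  rw [hnil] at hm
  simp at hm

-- ---------- generic counting lemmas ----------
lemma pvCountP_or_disjoint {α : Type} (p q : α → Bool) :
    ∀ (l : List α), (∀ x ∈ l, ¬(p x = true ∧ q x = true)) →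
      l.countP (fun x => p x || q x) = l.countP p + l.countP q := by
  intro l
  induction l with
  | nil => intro _; simp
  | cons a t ih =>
    intro h
    simp only [List.countP_cons]
    rw [ih (fun x hx => h x (List.mem_cons_of_mem _ hx))]
    cases hp : p a <;> cases hq : q a <;> simp [hp, hq] <;> try omega
    exact absurd ⟨hp, hq⟩ (h a List.mem_cons_self)

lemma pvCountP_nodup_eq (K1 K2 : List String) (p : String → Bool)
    (h1 : K1.Nodup) (h2 : K2.Nodup)
    (hmem : ∀ k, p k = true → (k ∈ K1 ↔ k ∈ K2)) : K1.countP p = K2.countP p := by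
  rw [List.countP_eq_length_filter, List.countP_eq_length_filter]
  apply List.Perm.length_eq
  apply List.perm_of_nodup_nodup_toFinset_eq (h1.filter p) (h2.filter p)
  ext a
  simp only [List.mem_toFinset, List.mem_filter]
  constructor
  · rintro ⟨ha, hp⟩; exact ⟨(hmem a hp).mp ha, hp⟩
  · rintro ⟨ha, hp⟩; exact ⟨(hmem a hp).mpr ha, hp⟩

-- ---------- B's difference array, pointwise ----------
lemma pvInc_length (l : List Int) (i : Int) : (pvInc l i).length = l.length := by
  simp [pvInc]

lemma pvInc_getD (l : List Int) (i : Int) (hi : 0 ≤ i) (j : Nat) (hj : j < l.length) :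
    (pvInc l i).getD j 0 = l.getD j 0 + (if i = (j : Int) then 1 else 0) := by
  unfold pvInc
  have hlen : j < (l.set i.toNat (l.getD i.toNat 0 + 1)).length := by simpa using hj
  rw [List.getD_eq_getElem _ _ hlen, List.getElem_set, List.getD_eq_getElem _ _ hj]
  by_cases h : i = (j : Int)
  · have hn : i.toNat = j := by omega
    rw [if_pos hn, hn, List.getD_eq_getElem _ _ hj, if_pos h]
  · have hn : i.toNat ≠ j := by omega
    rw [if_neg hn, if_neg h, add_zero]

lemma pvInnerB_length (idxs : List Int) (nI : Int) :
    ∀ (t : List Int) (l : List Int),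
      (t.foldl (fun changes i =>
          let changes := if 0 < i ∧ (i - 1) ∉ idxs then pvInc changes (i - 1) else changes
          if i + 1 < nI ∧ (i + 1) ∉ idxs then pvInc changes i else changes) l).length = l.length := by
  intro t
  induction t with
  | nil => intro l; rfl
  | cons a t ih =>
    intro l
    rw [List.foldl_cons, ih]
    dsimp only
    split <;> split <;> simp [pvInc_length]

def pvContrib (idxs : List Int) (nI : Int) (j : Nat) (i : Int) : Bool :=
  (decide (0 < i) && !(decide ((i - 1) ∈ idxs)) && decide (i - 1 = (j : Int))) ||
  (decide (i + 1 < nI) && !(decide ((i + 1) ∈ idxs)) && decide (i = (j : Int)))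

lemma pvInnerB_getD (idxs : List Int) (nI : Int)
    (hb : ∀ i ∈ idxs, 0 ≤ i ∧ i < nI) (j : Nat) (hj : (j : Int) < nI - 1) :
    ∀ (t : List Int) (l : List Int), (∀ i ∈ t, i ∈ idxs) → (l.length : Int) + 1 = nI →
      (t.foldl (fun changes i =>
          let changes := if 0 < i ∧ (i - 1) ∉ idxs then pvInc changes (i - 1) else changes
          if i + 1 < nI ∧ (i + 1) ∉ idxs then pvInc changes i else changes) l).getD j 0
        = l.getD j 0 + ((t.countP (pvContrib idxs nI j) : Nat) : Int) := by
  intro t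
  induction t with
  | nil => intro l _ _; simp
  | cons a t ih =>
    intro l hmem hlen
    have ha := hb a (hmem a List.mem_cons_self)
    have hjl : j < l.length := by omega
    rw [List.foldl_cons, List.countP_cons]
    dsimp only
    have hstep2 :
        (((if a + 1 < nI ∧ (a + 1) ∉ idxs then
            pvInc (if 0 < a ∧ (a - 1) ∉ idxs then pvInc l (a - 1) else l) a
          else (if 0 < a ∧ (a - 1) ∉ idxs then pvInc l (a - 1) else l)).length : Int)) + 1 = nI := by
      split <;> split <;> (try simp only [pvInc_length]) <;> exact hlen
    rw [ih _ (fun i hi => hmem i (List.mem_cons_of_mem _ hi)) hstep2]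
    have hg1 : (if 0 < a ∧ (a - 1) ∉ idxs then pvInc l (a - 1) else l).getD j 0
        = l.getD j 0 + (if (decide (0 < a) && !(decide ((a - 1) ∈ idxs)) && decide (a - 1 = (j : Int))) then 1 else 0) := by
      by_cases h1 : 0 < a ∧ (a - 1) ∉ idxs
      · rw [if_pos h1, pvInc_getD l (a - 1) (by omega) j hjl]
        simp [h1.1, h1.2]
      · rw [if_neg h1]
        have hx : (decide (0 < a) && !(decide ((a - 1) ∈ idxs)) && decide (a - 1 = (j : Int))) = false := by
          rcases Decidable.not_and_iff_not_or_not.mp h1 with hcase | hcase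
        -- split on which conjunct fails
          · simp [hcase]
          · simp only [not_not] at hcase
            simp [hcase]
        simp [hx]
    have hjl2 : j < (if 0 < a ∧ (a - 1) ∉ idxs then pvInc l (a - 1) else l).length := by
      split <;> simpa [pvInc_length] using hjl
    have hg2 : (if a + 1 < nI ∧ (a + 1) ∉ idxs then
            pvInc (if 0 < a ∧ (a - 1) ∉ idxs then pvInc l (a - 1) else l) a
          else (if 0 < a ∧ (a - 1) ∉ idxs then pvInc l (a - 1) else l)).getD j 0
        = (if 0 < a ∧ (a - 1) ∉ idxs then pvInc l (a - 1) else l).getD j 0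
          + (if (decide (a + 1 < nI) && !(decide ((a + 1) ∈ idxs)) && decide (a = (j : Int))) then 1 else 0) := by
      by_cases h2 : a + 1 < nI ∧ (a + 1) ∉ idxs
      · rw [if_pos h2, pvInc_getD _ a (by omega) j hjl2]
        simp [h2.1, h2.2]
      · rw [if_neg h2]
        have hx : (decide (a + 1 < nI) && !(decide ((a + 1) ∈ idxs)) && decide (a = (j : Int))) = false := by
          rcases Decidable.not_and_iff_not_or_not.mp h2 with hcase | hcase
          · simp [hcase]
          · simp only [not_not] at hcase
            simp [hcase]
        simp [hx]
    rw [hg2, hg1]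
    have hdisj : ¬((decide (0 < a) && !(decide ((a - 1) ∈ idxs)) && decide (a - 1 = (j : Int))) = true
        ∧ (decide (a + 1 < nI) && !(decide ((a + 1) ∈ idxs)) && decide (a = (j : Int))) = true) := by
      rintro ⟨hx, hy⟩
      simp only [Bool.and_eq_true, decide_eq_true_eq] at hx hy
      omega
    unfold pvContrib
    cases hx : (decide (0 < a) && !(decide ((a - 1) ∈ idxs)) && decide (a - 1 = (j : Int))) <;>
      cases hy : (decide (a + 1 < nI) && !(decide ((a + 1) ∈ idxs)) && decide (a = (j : Int)))
    · simp only [Bool.false_eq_true, if_false, Bool.or_self, add_zero]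
    · simp only [Bool.false_eq_true, if_true, if_false, Bool.false_or, add_zero]
      push_cast; omega
    · simp only [Bool.false_eq_true, if_true, if_false, Bool.or_false, add_zero]
      push_cast; omega
    · exact absurd ⟨hx, hy⟩ hdisj

lemma pvCountP_eq_count (idxs : List Int) (c : Int) :
    idxs.countP (fun i => decide (i = c)) = List.count c idxs := by
  rw [List.count]
  apply List.countP_congr
  intro i _
  by_cases h : i = c <;> simp [h]

lemma pvCount_xor (idxs : List Int) (nI : Int) (hnd : idxs.Nodup)
    (hb : ∀ i ∈ idxs, 0 ≤ i ∧ i < nI) (j : Nat) (hj : (j : Int) < nI - 1) :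
    idxs.countP (pvContrib idxs nI j)
      = if ((((j : Int) + 1) ∈ idxs) != ((j : Int) ∈ idxs)) then 1 else 0 := by
  have hcong : idxs.countP (pvContrib idxs nI j)
      = idxs.countP (fun i =>
          (decide (i = (j : Int) + 1) && !(decide ((j : Int) ∈ idxs))) ||
          (decide (i = (j : Int)) && !(decide (((j : Int) + 1) ∈ idxs)))) := by
    apply List.countP_congr
    intro i hi
    have hbi := hb i hi
    unfold pvContrib
    by_cases h1 : i = (j : Int) + 1
    · subst h1
      have e : (j : Int) + 1 - 1 = (j : Int) := by ring
      have h1' : ¬((j : Int) + 1 = (j : Int)) := by omega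
      simp [e, h1']
    · by_cases h2 : i = (j : Int)
      · subst h2
        have hne : ¬((j : Int) - 1 = (j : Int)) := by omega
        have hlt : (j : Int) + 1 < nI := by omega
        simp [hne, h1, hlt]
      · have hne1 : ¬(i - 1 = (j : Int)) := by omega
        have e1 : decide (i - 1 = (j : Int)) = false := by simp [hne1]
        have e2 : decide (i = (j : Int)) = false := by simp [h2]
        have e3 : decide (i = (j : Int) + 1) = false := by simp [h1]
        simp [e1, e2, e3]
  rw [hcong]
  by_cases m0 : (j : Int) ∈ idxs <;> by_cases m1 : ((j : Int) + 1) ∈ idxs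
  · have hz : idxs.countP (fun i =>
        (decide (i = (j : Int) + 1) && !(decide ((j : Int) ∈ idxs))) ||
        (decide (i = (j : Int)) && !(decide (((j : Int) + 1) ∈ idxs)))) = 0 := by
      apply List.countP_eq_zero.mpr
      intro i _
      simp [m0, m1]
    rw [hz]
    simp [m0, m1]
  · have hc : idxs.countP (fun i =>
        (decide (i = (j : Int) + 1) && !(decide ((j : Int) ∈ idxs))) ||
        (decide (i = (j : Int)) && !(decide (((j : Int) + 1) ∈ idxs))))
        = idxs.countP (fun i => decide (i = (j : Int))) := by
      apply List.countP_congr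
      intro i _
      simp [m0, m1]
    rw [hc, pvCountP_eq_count, List.count_eq_one_of_mem hnd m0]
    simp [m0, m1]
  · have hc : idxs.countP (fun i =>
        (decide (i = (j : Int) + 1) && !(decide ((j : Int) ∈ idxs))) ||
        (decide (i = (j : Int)) && !(decide (((j : Int) + 1) ∈ idxs))))
        = idxs.countP (fun i => decide (i = (j : Int) + 1)) := by
      apply List.countP_congr
      intro i _
      simp [m0, m1]
    rw [hc, pvCountP_eq_count, List.count_eq_one_of_mem hnd m1]
    simp [m0, m1]
  · have hz : idxs.countP (fun i =>
        (decide (i = (j : Int) + 1) && !(decide ((j : Int) ∈ idxs))) ||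
        (decide (i = (j : Int)) && !(decide (((j : Int) + 1) ∈ idxs)))) = 0 := by
      apply List.countP_eq_zero.mpr
      intro i hi
      have n1 : i ≠ (j : Int) + 1 := fun h => m1 (h ▸ hi)
      have n2 : i ≠ (j : Int) := fun h => m0 (h ▸ hi)
      simp [n1, n2, m0, m1]
    rw [hz]
    simp [m0, m1]

lemma pvOuterB_length (nI : Int) :
    ∀ (vs : List (List Int)) (l : List Int),
      (vs.foldl (fun changes idxs =>
          idxs.foldl (fun changes i =>
            let changes := if 0 < i ∧ (i - 1) ∉ idxs then pvInc changes (i - 1) else changes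
            if i + 1 < nI ∧ (i + 1) ∉ idxs then pvInc changes i else changes) changes) l).length
        = l.length := by
  intro vs
  induction vs with
  | nil => intro l; rfl
  | cons s vs ih =>
    intro l
    rw [List.foldl_cons, ih, pvInnerB_length]

lemma pvOuterB_getD (nI : Int) (j : Nat) (hj : (j : Int) < nI - 1) :
    ∀ (vs : List (List Int)) (l : List Int),
      (∀ s ∈ vs, s.Nodup ∧ ∀ i ∈ s, 0 ≤ i ∧ i < nI) → (l.length : Int) + 1 = nI →
      (vs.foldl (fun changes idxs =>
          idxs.foldl (fun changes i =>
            let changes := if 0 < i ∧ (i - 1) ∉ idxs then pvInc changes (i - 1) else changes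
            if i + 1 < nI ∧ (i + 1) ∉ idxs then pvInc changes i else changes) changes) l).getD j 0
        = l.getD j 0 + ((vs.countP (fun s => ((((j : Int) + 1) ∈ s) != ((j : Int) ∈ s))) : Nat) : Int) := by
  intro vs
  induction vs with
  | nil => intro l _ _; simp
  | cons s vs ih =>
    intro l hvs hlen
    rw [List.foldl_cons, List.countP_cons]
    have hs := hvs s List.mem_cons_self
    have hlen2 : (((s.foldl (fun changes i =>
        let changes := if 0 < i ∧ (i - 1) ∉ s then pvInc changes (i - 1) else changes
        if i + 1 < nI ∧ (i + 1) ∉ s then pvInc changes i else changes) l).length : Int)) + 1 = nI := by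
      rw [pvInnerB_length]; exact hlen
    rw [ih _ (fun v hv => hvs v (List.mem_cons_of_mem _ hv)) hlen2,
      pvInnerB_getD s nI hs.2 j hj s l (fun i hi => hi) hlen,
      pvCount_xor s nI hs.1 hs.2 j hj]
    split <;> push_cast <;> ring

-- ---------- A's count as a count over the activity keys ----------
lemma pvStep_eq_keysCount (cs : List (List (String × List (String × List (String × Bool)))))
    (h : ∀ cp ∈ cs, ((pvNd cp).map Prod.fst).Nodup) (j : Nat) (hj : j + 1 < cs.length) :
    pvStep (cs.getD j []) (cs.getD (j + 1) [])
      = (((pvActivity cs).keys.countP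
            (fun k => pvAct (cs.getD (j + 1) []) k != pvAct (cs.getD j []) k) : Nat) : Int) := by
  have hmemp : cs.getD j [] ∈ cs := by
    rw [List.getD_eq_getElem _ _ (by omega)]; exact List.getElem_mem _
  have hmemc : cs.getD (j + 1) [] ∈ cs := by
    rw [List.getD_eq_getElem _ _ hj]; exact List.getElem_mem _
  have hp := h _ hmemp
  have hc := h _ hmemc
  have hK := pvNodup_keys_activity cs
  have hsplit : (pvActivity cs).keys.countP
        (fun k => pvAct (cs.getD (j + 1) []) k != pvAct (cs.getD j []) k)
      = (pvActivity cs).keys.countP (fun k => pvAct (cs.getD (j + 1) []) k && !pvAct (cs.getD j []) k)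
        + (pvActivity cs).keys.countP (fun k => pvAct (cs.getD j []) k && !pvAct (cs.getD (j + 1) []) k) := by
    rw [← pvCountP_or_disjoint _ _ _ ?_]
    · apply List.countP_congr
      intro k _
      cases h1 : pvAct (cs.getD (j + 1) []) k <;> cases h2 : pvAct (cs.getD j []) k <;> rfl
    · intro k _
      rintro ⟨h1, h2⟩
      rw [Bool.and_eq_true] at h1 h2
      rw [h2.1] at h1
      simp at h1
  have t1 : (pvActivity cs).keys.countP (fun k => pvAct (cs.getD (j + 1) []) k && !pvAct (cs.getD j []) k)
      = ((pvNd (cs.getD (j + 1) [])).map Prod.fst).countP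
          (fun k => pvAct (cs.getD (j + 1) []) k && !pvAct (cs.getD j []) k) := by
    apply pvCountP_nodup_eq _ _ _ hK hc
    intro k hk
    rw [Bool.and_eq_true] at hk
    constructor
    · intro _; exact pvAct_mem_ndKeys _ k hk.1
    · intro _; exact pvAct_mem_keys cs h (j + 1) hj k hk.1
  have t2 : (pvActivity cs).keys.countP (fun k => pvAct (cs.getD j []) k && !pvAct (cs.getD (j + 1) []) k)
      = ((pvNd (cs.getD j [])).map Prod.fst).countP
          (fun k => pvAct (cs.getD j []) k && !pvAct (cs.getD (j + 1) []) k) := by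
    apply pvCountP_nodup_eq _ _ _ hK hp
    intro k hk
    rw [Bool.and_eq_true] at hk
    constructor
    · intro _; exact pvAct_mem_ndKeys _ k hk.1
    · intro _; exact pvAct_mem_keys cs h j (by omega) k hk.1
  have u1 : (pvNd (cs.getD (j + 1) [])).countP
        (fun kv => pvAct (cs.getD (j + 1) []) kv.1 && !pvAct (cs.getD j []) kv.1)
      = ((pvNd (cs.getD (j + 1) [])).map Prod.fst).countP
          (fun k => pvAct (cs.getD (j + 1) []) k && !pvAct (cs.getD j []) k) := by
    rw [List.countP_map]; rfl
  have u2 : (pvNd (cs.getD j [])).countP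
        (fun kv => pvAct (cs.getD j []) kv.1 && !pvAct (cs.getD (j + 1) []) kv.1)
      = ((pvNd (cs.getD j [])).map Prod.fst).countP
          (fun k => pvAct (cs.getD j []) k && !pvAct (cs.getD (j + 1) []) k) := by
    rw [List.countP_map]; rfl
  rw [pvStep, hsplit, t1, t2, u1, u2]
  push_cast
  ring

-- ---------- B's normal form ----------
lemma pvB_eq (cs : List (List (String × List (String × List (String × Bool)))))
    (h : ∀ cp ∈ cs, ((pvNd cp).map Prod.fst).Nodup) (h2 : 2 ≤ cs.length) :
    calculate_node_changes_alt cs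
      = (List.range (cs.length - 1)).map (fun j => pvStep (cs.getD j []) (cs.getD (j + 1) [])) := by
  unfold calculate_node_changes_alt
  rw [PySem.List.len_eq]
  have hnot : ¬ ((cs.length : Int) < 2) := by omega
  rw [if_neg hnot]
  have hrep : (((cs.length : Int)) - 1).toNat = cs.length - 1 := by omega
  have hK := pvNodup_keys_activity cs
  have hvalues : (pvActivity cs).values
      = (pvActivity cs).keys.map (fun k => (pvActivity cs).getD k []) :=
    PySem.Dict.values_eq_map_keys (pvActivity cs) hK []
  have hprops : ∀ s ∈ (pvActivity cs).values, s.Nodup ∧ ∀ i ∈ s, 0 ≤ i ∧ i < (cs.length : Int) := by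
    intro s hsv
    rw [hvalues, List.mem_map] at hsv
    rcases hsv with ⟨k, _, rfl⟩
    rw [pvActivity_getD cs h k]
    exact ⟨pvIdxList_nodup k cs 0, fun i hi => pvIdxList_bounds k cs i hi⟩
  have hlen0 : ((List.replicate (((cs.length : Int)) - 1).toNat (0 : Int)).length : Int) + 1
      = (cs.length : Int) := by
    simp only [List.length_replicate, hrep]; omega
  apply List.ext_getElem
  · rw [pvOuterB_length]
    simp [hrep]
  · intro j hjl hjr
    have hjlen : j < cs.length - 1 := by
      rw [pvOuterB_length] at hjl
      simpa [hrep] using hjl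
    have hj : (j : Int) < (cs.length : Int) - 1 := by omega
    rw [← List.getD_eq_getElem _ 0 hjl,
      pvOuterB_getD (cs.length : Int) j hj ((pvActivity cs).values) _ hprops hlen0]
    simp only [List.getElem_map, List.getElem_range]
    have hget0 : (List.replicate (((cs.length : Int)) - 1).toNat (0 : Int)).getD j 0 = 0 := by
      simp [List.getD]
    rw [hget0, zero_add]
    have hcnt : (pvActivity cs).values.countP
          (fun s => ((((j : Int) + 1) ∈ s) != ((j : Int) ∈ s)))
        = (pvActivity cs).keys.countP
          (fun k => pvAct (cs.getD (j + 1) []) k != pvAct (cs.getD j []) k) := by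
      rw [hvalues, List.countP_map]
      apply List.countP_congr
      intro k _
      simp only [Function.comp_def]
      rw [pvActivity_getD cs h k]
      have e1 : ((j : Int) + 1) = ((j + 1 : Nat) : Int) := by push_cast; ring
      simp only [e1, mem_pvIdxList_nat k cs (j + 1) (by omega), mem_pvIdxList_nat k cs j (by omega)]
      simp
    rw [hcnt, ← pvStep_eq_keysCount cs h j (by omega)]

-- ===== VERDICT (by name: the statement is the Claim_ definition above) =====
theorem calculate_node_changes_spec : Claim_equal_calculate_node_changes := by
  intro cs hdom hpre
  unfold Spec_calculate_node_changes
  rcases hpre with ⟨hns, hnd⟩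
  by_cases h2 : 2 ≤ cs.length
  · rw [pvA_eq_map, pvB_eq cs (fun cp hcp => hnd cp hcp) h2]
  · rw [pvA_eq_map]
    have hlen : cs.length - 1 = 0 := by omega
    rw [hlen]
    have hsmall : ((cs.length : Int)) < 2 := by omega
    simp [calculate_node_changes_alt, PySem.List.len_eq, hsmall]
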